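-- pv_equiv track=rewrite | github.com/HelloWorld-er/Advent-of-Code | 2023/Question 12/2.py | check
-- ===== SOURCE A (Python) =====
-- def check(symbol_list, number_list, unknown_list, unknown_index):
-- 	damaged_list = []
-- 	decide = False
-- 	for symbol_index in range(len(symbol_list)):
-- 		if (symbol_list[symbol_index] == '#') or (symbol_index in unknown_index):
-- 			if decide:
-- 				damaged_list[-1] += 1
-- 			else:
-- 				decide = True
-- 				damaged_list.append(1)
-- 		elif decide:
-- 			decide = False
-- 	if damaged_list == number_list:
-- 		return True
-- 	return False
-- ===== SOURCE B (Python) =====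
-- def check(symbol_list, number_list, unknown_list, unknown_index):
--     resolved = ''.join('#' if (c == '#' or i in unknown_index) else '.'
--                        for i, c in enumerate(symbol_list))
--     return [len(p) for p in resolved.split('.') if p] == number_list
-- ===== Notes on version B (the rewrite author's own statement) =====
-- stated objective: simpler
-- what changed: Replaces the index loop with a mutable (run-list, in-run flag) state by a two-phase decomposition: resolve every position to '#'/'.' into a string, then split on '.' and take the lengths of the nonempty pieces.
import Mathlib
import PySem

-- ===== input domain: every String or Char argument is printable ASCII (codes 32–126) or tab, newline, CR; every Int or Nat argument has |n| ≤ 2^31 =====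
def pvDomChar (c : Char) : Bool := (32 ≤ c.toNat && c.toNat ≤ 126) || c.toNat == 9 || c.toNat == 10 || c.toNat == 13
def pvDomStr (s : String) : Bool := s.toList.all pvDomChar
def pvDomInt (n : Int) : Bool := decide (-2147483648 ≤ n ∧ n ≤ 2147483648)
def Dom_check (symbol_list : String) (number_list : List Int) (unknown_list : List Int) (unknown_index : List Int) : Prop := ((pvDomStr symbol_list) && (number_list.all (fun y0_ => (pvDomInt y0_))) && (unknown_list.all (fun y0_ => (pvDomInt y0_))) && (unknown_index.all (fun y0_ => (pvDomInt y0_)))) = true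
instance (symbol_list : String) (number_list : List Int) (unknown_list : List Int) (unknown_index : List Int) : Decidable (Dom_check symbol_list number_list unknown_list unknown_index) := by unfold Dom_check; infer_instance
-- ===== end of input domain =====

-- B replaces A's stateful run-building index loop by a two-phase decomposition (resolve each
-- position to '#'/'.' then split on '.' and take lengths of nonempty pieces); objective: simpler.

-- ===== PORT A =====
-- 'damaged_list[-1] += 1' is only reached with decide = True, when damaged_list is nonempty;
-- it is transliterated as dropLast ++ [getLastD 0 + 1] (exact on nonempty lists).
def check (symbol_list : String) (number_list : List Int) (unknown_list : List Int) (unknown_index : List Int) : Bool :=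
  let st := (PySem.List.pyRange 0 (PySem.Str.len symbol_list) 1).foldl
    (fun (st : List Int × Bool) symbol_index =>
      if (PySem.Str.pyGet? symbol_list symbol_index == some '#') || unknown_index.contains symbol_index then
        if st.2 then (st.1.dropLast ++ [st.1.getLastD 0 + 1], st.2)
        else (st.1 ++ [1], true)
      else if st.2 then (st.1, false) else st)
    ([], false)
  if st.1 == number_list then true else false

-- ===== PORT B =====
def check_alt (symbol_list : String) (number_list : List Int) (unknown_list : List Int) (unknown_index : List Int) : Bool :=
  let resolved : List Char := (PySem.List.enumerate symbol_list.toList 0).map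
    (fun ic => if ic.2 == '#' || unknown_index.contains ic.1 then '#' else '.')
  ((PySem.Chars.splitOn resolved ['.']).filter (fun p => !p.isEmpty)).map
      (fun p => (p.length : Int)) == number_list

-- ===== PRECONDITION & SPEC =====
def Spec_check (symbol_list : String) (number_list : List Int) (unknown_list : List Int) (unknown_index : List Int) (out : Bool) : Prop := out = check_alt symbol_list number_list unknown_list unknown_index
instance (symbol_list : String) (number_list : List Int) (unknown_list : List Int) (unknown_index : List Int) (out : Bool) : Decidable (Spec_check symbol_list number_list unknown_list unknown_index out) := by unfold Spec_check; infer_instance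

-- ===== CLAIM (what is proved, stated in full; the proofs are below) =====
def Claim_equal_check : Prop := ∀ (symbol_list : String) (number_list : List Int) (unknown_list : List Int) (unknown_index : List Int), Dom_check symbol_list number_list unknown_list unknown_index → Spec_check symbol_list number_list unknown_list unknown_index (check symbol_list number_list unknown_list unknown_index)

-- ===== LEMMAS AND PROOFS =====

-- natural single-pass split on '.' (proof-side characterisation of PySem.Chars.splitOn · ['.'])
def splitDot : List Char → List (List Char)
  | [] => [[]]
  | c :: rest =>
      if c = '.' then [] :: splitDot rest
      else match splitDot rest with
           | [] => [[c]]
           | h :: t => (c :: h) :: t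

-- run lengths of a boolean list; the state is the length of the open run of `true`s (if any)
def runsA : Option Nat → List Bool → List Int
  | none, [] => []
  | some k, [] => [(k : Int)]
  | none, true :: bs => runsA (some 1) bs
  | some k, true :: bs => runsA (some (k + 1)) bs
  | none, false :: bs => runsA none bs
  | some k, false :: bs => (k : Int) :: runsA none bs

def stepB (st : List Int × Bool) (b : Bool) : List Int × Bool :=
  if b then
    if st.2 then (st.1.dropLast ++ [st.1.getLastD 0 + 1], st.2)
    else (st.1 ++ [1], true)
  else (st.1, false)

def toChar (b : Bool) : Char := if b then '#' else '.'

def gLens (ps : List (List Char)) : List Int :=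
  (ps.filter (fun p => !p.isEmpty)).map (fun p => (p.length : Int))

lemma splitDot_ne_nil (cs : List Char) : splitDot cs ≠ [] := by
  cases cs with
  | nil => simp [splitDot]
  | cons c rest =>
      simp only [splitDot]
      split
      · simp
      · split <;> simp

lemma splitOn_go_dot (fuel : Nat) : ∀ (l cur : List Char) (accs : List (List Char)),
    l.length < fuel →
    PySem.Chars.splitOn.go ['.'] fuel l cur accs =
      accs.reverse ++ (match splitDot l with
        | [] => [cur.reverse]
        | h :: t => (cur.reverse ++ h) :: t) := by
  induction fuel with
  | zero => intro l cur accs h; omega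
  | succ f ih =>
      intro l cur accs h
      cases l with
      | nil =>
          simp [PySem.Chars.splitOn.go, splitDot]
      | cons c rest =>
          by_cases hc : c = '.'
          · subst hc
            rw [show PySem.Chars.splitOn.go ['.'] (f+1) ('.' :: rest) cur accs
                  = PySem.Chars.splitOn.go ['.'] f rest [] (cur.reverse :: accs) by
                simp [PySem.Chars.splitOn.go, List.isPrefixOf]]
            rw [ih rest [] (cur.reverse :: accs) (by simpa using Nat.lt_of_succ_lt_succ h)]
            have hne := splitDot_ne_nil rest
            cases hsd : splitDot rest with
            | nil => exact absurd hsd hne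
            | cons h' t' => simp [splitDot, hsd]
          · rw [show PySem.Chars.splitOn.go ['.'] (f+1) (c :: rest) cur accs
                  = PySem.Chars.splitOn.go ['.'] f rest (c :: cur) accs by
                simp [PySem.Chars.splitOn.go, List.isPrefixOf, Ne.symm hc]]
            rw [ih rest (c :: cur) accs (by simpa using Nat.lt_of_succ_lt_succ h)]
            have hne := splitDot_ne_nil rest
            cases hsd : splitDot rest with
            | nil => exact absurd hsd hne
            | cons h' t' => simp [splitDot, hsd, hc]

lemma splitOn_dot (cs : List Char) : PySem.Chars.splitOn cs ['.'] = splitDot cs := by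
  rw [show PySem.Chars.splitOn cs ['.'] = PySem.Chars.splitOn.go ['.'] (cs.length + 1) cs [] [] from rfl]
  rw [splitOn_go_dot (cs.length + 1) cs [] [] (Nat.lt_succ_self _)]
  have hne := splitDot_ne_nil cs
  cases hsd : splitDot cs with
  | nil => exact absurd hsd hne
  | cons h t => simp

lemma splitDot_runs (bs : List Bool) :
    gLens (splitDot (bs.map toChar)) = runsA none bs ∧
    ∀ (k : Nat) h t, 0 < k → splitDot (bs.map toChar) = h :: t →
      gLens ((List.replicate k '#' ++ h) :: t) = runsA (some k) bs := by
  induction bs with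
  | nil =>
      constructor
      · simp [splitDot, gLens, runsA]
      · intro k h t hk hsd
        simp [splitDot] at hsd
        obtain ⟨rfl, rfl⟩ := hsd
        simp [gLens, runsA, List.filter, Nat.pos_iff_ne_zero.mp hk]
  | cons b bs ih =>
      have hne := splitDot_ne_nil (bs.map toChar)
      cases hh : splitDot (bs.map toChar) with
      | nil => exact absurd hh hne
      | cons h' t' =>
          cases b with
          | true =>
              constructor
              · have := ih.2 1 h' t' one_pos hh
                simpa [splitDot, toChar, hh, gLens] using this
              · intro k h t hk hsd
                simp [splitDot, toChar, hh] at hsd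
                obtain ⟨rfl, rfl⟩ := hsd
                have := ih.2 (k+1) h' t' (Nat.succ_pos _) hh
                rw [show List.replicate k '#' ++ ('#' :: h') = List.replicate (k+1) '#' ++ h' by
                  simp [List.replicate_succ']
                ]
                simpa [runsA] using this
          | false =>
              constructor
              · simp only [splitDot, toChar, runsA, List.map_cons]
                simp only [gLens] at ih ⊢
                simpa [List.filter] using ih.1
              · intro k h t hk hsd
                simp [splitDot, toChar] at hsd
                obtain ⟨rfl, rfl⟩ := hsd
                simp [gLens, runsA, List.filter, Nat.pos_iff_ne_zero.mp hk]
                exact ih.1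

lemma foldA (bs : List Bool) :
    (∀ dl, (bs.foldl stepB (dl, false)).1 = dl ++ runsA none bs) ∧
    (∀ dl (k : Nat), (bs.foldl stepB (dl ++ [(k : Int)], true)).1 = dl ++ runsA (some k) bs) := by
  induction bs with
  | nil => simp [runsA]
  | cons b bs ih =>
      cases b with
      | true =>
          constructor
          · intro dl
            have := ih.2 dl 1
            simpa [stepB, runsA] using this
          · intro dl k
            have h1 : stepB (dl ++ [(k : Int)], true) true
                = (dl ++ [((k+1 : Nat) : Int)], true) := by
              simp [stepB]
            rw [List.foldl_cons, h1, (ih.2 dl (k+1))]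
            simp [runsA]
      | false =>
          constructor
          · intro dl
            have := ih.1 dl
            simpa [stepB, runsA] using this
          · intro dl k
            have h1 : stepB (dl ++ [(k : Int)], true) false = (dl ++ [(k : Int)], false) := by
              simp [stepB]
            rw [List.foldl_cons, h1, ih.1 (dl ++ [(k : Int)])]
            simp [runsA]

-- ===== VERDICT (by name: the statement is the Claim_ definition above) =====
lemma cond_bridge (s : String) (ui : List Int) (st : List Int × Bool) (j : Int)
    (hj : j ∈ PySem.List.pyRange 0 (PySem.Str.len s) 1) :
    (if (PySem.Str.pyGet? s j == some '#') || ui.contains j then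
        if st.2 then (st.1.dropLast ++ [st.1.getLastD 0 + 1], st.2)
        else (st.1 ++ [1], true)
      else if st.2 then (st.1, false) else st)
    = stepB st ((PySem.List.pyGetD s.toList j '.' == '#') || ui.contains j) := by
  rw [PySem.List.mem_pyRange_one] at hj
  have hlen : PySem.Str.len s = (s.toList.length : Int) := by
    simp [PySem.Str.len]
  rw [hlen] at hj
  obtain ⟨h0, hb⟩ := hj
  obtain ⟨k, rfl⟩ : ∃ k : Nat, j = (k : Int) := ⟨j.toNat, (Int.toNat_of_nonneg h0).symm⟩
  have hk : k < s.toList.length := by exact_mod_cast hb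
  have hget : PySem.Str.pyGet? s (k : Int) = some s.toList[k] := by
    simp [PySem.List.pyGet?_natCast, List.getElem?_eq_getElem hk]
  have hgetD : PySem.List.pyGetD s.toList (k : Int) '.' = s.toList[k] := by
    rw [PySem.List.pyGetD_natCast]
    simp [List.getD_eq_getElem?_getD, List.getElem?_eq_getElem hk]
  rw [hget, hgetD]
  obtain ⟨dl, dec⟩ := st
  cases dec <;> simp [stepB]

theorem check_spec : Claim_equal_check := by
  intro s nl ul ui _
  unfold Spec_check check check_alt
  have hlen : PySem.Str.len s = PySem.List.len s.toList := by
    simp [PySem.Str.len, PySem.List.len]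
  -- the boolean "damaged" flags, indexed over enumerate
  set flag : Int × Char → Bool := fun ic => (ic.2 == '#') || ui.contains ic.1 with hflag
  set flagsE : List Bool := (PySem.List.enumerate s.toList 0).map flag with hflagsE
  -- B side: resolved characters are the flags rendered through toChar
  have hres : (PySem.List.enumerate s.toList 0).map
      (fun ic => if ic.2 == '#' || ui.contains ic.1 then '#' else '.') = flagsE.map toChar := by
    rw [hflagsE, List.map_map]
    rfl
  -- A side: the pyRange fold is the stepB fold over flagsE
  have hfold : (PySem.List.pyRange 0 (PySem.Str.len s) 1).foldl
      (fun (st : List Int × Bool) symbol_index =>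
        if (PySem.Str.pyGet? s symbol_index == some '#') || ui.contains symbol_index then
          if st.2 then (st.1.dropLast ++ [st.1.getLastD 0 + 1], st.2)
          else (st.1 ++ [1], true)
        else if st.2 then (st.1, false) else st)
      ([], false)
      = flagsE.foldl stepB ([], false) := by
    rw [hflagsE, List.foldl_map, PySem.List.enumerate_eq_map_pyRange s.toList '.',
        List.foldl_map, ← hlen]
    exact PySem.List.foldl_congr_mem _ _ _ _
      (fun st j hj => cond_bridge s ui st j hj)
  rw [hres, hfold]
  show (if ((List.foldl stepB ([], false) flagsE).1 == nl) = true then true else false)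
      = (List.map (fun p => ((p.length : Nat) : Int))
          (List.filter (fun p => !p.isEmpty) (PySem.Chars.splitOn (List.map toChar flagsE) ['.'])) == nl)
  have hB := (splitDot_runs flagsE).1
  simp only [gLens] at hB
  have hA := (foldA flagsE).1 []
  simp only [List.nil_append] at hA
  rw [splitOn_dot, hB, hA]
  cases h : (runsA none flagsE == nl) <;> simp
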